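-- pv_equiv track=rewrite | github.com/user-248-afk/NeuroBlink | Max1(AF7 + AF8).py | group_indices
-- ===== SOURCE A (Python) =====
-- FS = 256
--
-- GROUP_GAP_MS = 520
--
-- def group_indices(idxs):
--     if len(idxs) == 0:
--         return []
--     groups = []
--     cur = [idxs[0]]
--     for t in idxs[1:]:
--         dt = (t - cur[-1]) / FS * 1000
--         if dt <= GROUP_GAP_MS:
--             cur.append(t)
--         else:
--             groups.append(cur)
--             cur = [t]
--     groups.append(cur)
--     return groups
-- ===== SOURCE B (Python) =====
-- FS = 256
--
-- GROUP_GAP_MS = 520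
--
-- def group_indices(idxs):
--     # Boundary-scan decomposition: repeatedly find the end k of the maximal
--     # run of gap-close indices starting at pos, and emit the slice idxs[pos:k].
--     groups = []
--     pos = 0
--     n = len(idxs)
--     while pos < n:
--         k = pos + 1
--         while k < n and (idxs[k] - idxs[k - 1]) / FS * 1000 <= GROUP_GAP_MS:
--             k += 1
--         groups.append(idxs[pos:k])
--         pos = k
--     return groups
-- ===== Notes on version B (the rewrite author's own statement) =====
-- stated objective: alternative
-- what changed: B replaces A's single accumulator loop (groups + growing cur list) by a recursive decomposition: find the end of the maximal leading close-run with a scan, slice it off, and recurse on the remainder.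
import Mathlib
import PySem

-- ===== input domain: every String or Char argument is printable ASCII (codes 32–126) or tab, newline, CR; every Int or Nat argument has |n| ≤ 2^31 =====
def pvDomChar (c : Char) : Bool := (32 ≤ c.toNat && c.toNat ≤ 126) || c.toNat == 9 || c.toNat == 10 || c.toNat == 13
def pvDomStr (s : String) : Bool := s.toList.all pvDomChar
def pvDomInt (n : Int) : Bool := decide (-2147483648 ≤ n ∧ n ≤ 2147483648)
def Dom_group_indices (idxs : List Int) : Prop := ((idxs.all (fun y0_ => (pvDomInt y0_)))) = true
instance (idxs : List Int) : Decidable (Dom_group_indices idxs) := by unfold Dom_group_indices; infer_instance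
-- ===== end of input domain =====

-- B is an alternative decomposition (recursive maximal-run splitting vs A's accumulator loop); equal return values, no speed claim.
-- In both ports the Python float test `(t - p) / 256 * 1000 <= 520` is written as the integer
-- inequality `(t - p) * 1000 ≤ 520 * 256`; this is exact on Dom (the float computation is exact
-- for |t - p| ≤ 2^32 and the comparison is equivalent to the rational one).

-- ===== PORT A =====
-- A's loop body: cur[-1] is `st.2.getLast!` (cur is never empty).
def pvStepA (st : List (List Int) × List Int) (t : Int) : List (List Int) × List Int :=
  if (t - st.2.getLast!) * 1000 ≤ 520 * 256 then (st.1, st.2 ++ [t])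
  else (st.1 ++ [st.2], [t])

def group_indices (idxs : List Int) : List (List Int) :=
  match idxs with
  | [] => []
  | x :: rest =>
    let st := rest.foldl pvStepA ([], [x])
    st.1 ++ [st.2]

-- ===== PORT B =====
-- the `while k < len(idxs) and (idxs[k]-idxs[k-1])/FS*1000 <= GROUP_GAP_MS: k += 1` loop
-- (indices are in range whenever read, so getD's default is never used)
def pvRunEnd (idxs : List Int) (k : Nat) : Nat :=
  if h : k < idxs.length then
    if (idxs.getD k 0 - idxs.getD (k - 1) 0) * 1000 ≤ 520 * 256 then pvRunEnd idxs (k + 1)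
    else k
  else k
termination_by idxs.length - k

theorem pvRunEnd_ge (idxs : List Int) (k : Nat) : k ≤ pvRunEnd idxs k := by
  fun_induction pvRunEnd idxs k with
  | case1 k h hc ih => omega
  | case2 k h hc => omega
  | case3 k h => omega

-- the outer `while pos < n` loop with its `groups.append(idxs[pos:k])`;
-- `idxs[pos:k]` with 0 ≤ pos ≤ k is (idxs.drop pos).take (k - pos)
def pvOuter (idxs : List Int) (pos : Nat) (groups : List (List Int)) : List (List Int) :=
  if pos < idxs.length then
    pvOuter idxs (pvRunEnd idxs (pos + 1))
      (groups ++ [(idxs.drop pos).take (pvRunEnd idxs (pos + 1) - pos)])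
  else groups
termination_by idxs.length - pos
decreasing_by
  have := pvRunEnd_ge idxs (pos + 1)
  omega

def group_indices_alt (idxs : List Int) : List (List Int) :=
  pvOuter idxs 0 []

-- ===== PRECONDITION & SPEC =====
def Spec_group_indices (idxs : List Int) (out : List (List Int)) : Prop := out = group_indices_alt idxs
instance (idxs : List Int) (out : List (List Int)) : Decidable (Spec_group_indices idxs out) := by unfold Spec_group_indices; infer_instance

-- ===== CLAIM (what is proved, stated in full; the proofs are below) =====
def Claim_equal_group_indices : Prop := ∀ (idxs : List Int), Dom_group_indices idxs → Spec_group_indices idxs (group_indices idxs)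

-- ===== LEMMAS AND PROOFS =====

-- the adjacent-closeness test both programs make
def pvClose (p t : Int) : Bool := (t - p) * 1000 ≤ 520 * 256

-- maximal close-chain span starting after previous element p
def pvSpan (p : Int) : List Int → List Int × List Int
  | [] => ([], [])
  | t :: ts =>
    if pvClose p t then
      let r := pvSpan t ts
      (t :: r.1, r.2)
    else ([], t :: ts)

theorem pvSpan_append (p : Int) (l : List Int) :
    (pvSpan p l).1 ++ (pvSpan p l).2 = l := by
  induction l generalizing p with
  | nil => simp [pvSpan]
  | cons t ts ih =>
    by_cases h : pvClose p t <;> simp [pvSpan, h, ih]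

theorem pvSpan_cons_pos (p t : Int) (ts : List Int) (h : pvClose p t = true) :
    pvSpan p (t :: ts) = (t :: (pvSpan t ts).1, (pvSpan t ts).2) := by
  simp [pvSpan, h]

theorem pvSpan_cons_neg (p t : Int) (ts : List Int) (h : pvClose p t = false) :
    pvSpan p (t :: ts) = ([], t :: ts) := by
  simp [pvSpan, h]

theorem pvGetLast!_concat (l : List Int) (t : Int) : (l ++ [t]).getLast! = t := by
  simp [List.getLast!_eq_getLast?_getD]

theorem pvFoldA_split (rest : List Int) (groups : List (List Int)) (cur : List Int) :
    rest.foldl pvStepA (groups, cur)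
      = (groups ++ (rest.foldl pvStepA ([], cur)).1, (rest.foldl pvStepA ([], cur)).2) := by
  induction rest generalizing groups cur with
  | nil => simp
  | cons t ts ih =>
    simp only [List.foldl_cons, pvStepA]
    by_cases h : (t - cur.getLast!) * 1000 ≤ 520 * 256
    · simp only [if_pos h]
      rw [ih groups (cur ++ [t])]
    · simp only [if_neg h, List.nil_append]
      rw [ih (groups ++ [cur]) [t], ih [cur] [t], List.append_assoc]

theorem pvFoldA_span (rest : List Int) (cur : List Int) (hcur : cur ≠ []) :
    (rest.foldl pvStepA ([], cur)).1 ++ [(rest.foldl pvStepA ([], cur)).2]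
      = (cur ++ (pvSpan cur.getLast! rest).1) :: group_indices (pvSpan cur.getLast! rest).2 := by
  induction rest generalizing cur with
  | nil => simp [pvSpan, group_indices]
  | cons t ts ih =>
    by_cases h : pvClose cur.getLast! t
    · have h' : (t - cur.getLast!) * 1000 ≤ 520 * 256 := by
        simpa [pvClose] using h
      have ht : (cur ++ [t]).getLast! = t := pvGetLast!_concat cur t
      simp only [List.foldl_cons, pvStepA, if_pos h']
      rw [ih (cur ++ [t]) (by simp), pvSpan_cons_pos _ _ _ h, ht]
      simp
    · have h' : ¬ (t - cur.getLast!) * 1000 ≤ 520 * 256 := by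
        simpa [pvClose] using h
      have hgi : group_indices (t :: ts)
          = (ts.foldl pvStepA ([], [t])).1 ++ [(ts.foldl pvStepA ([], [t])).2] := by
        simp [group_indices]
      simp only [List.foldl_cons, pvStepA, if_neg h', List.nil_append]
      rw [pvFoldA_split ts [cur] [t],
          pvSpan_cons_neg _ _ _ (by simpa using h)]
      simp [hgi]

theorem pvA_cons (x : Int) (rest : List Int) :
    group_indices (x :: rest)
      = (x :: (pvSpan x rest).1) :: group_indices (pvSpan x rest).2 := by
  have := pvFoldA_span rest [x] (by simp)
  simpa [group_indices] using this

theorem pvRunEnd_span (l : List Int) (k : Nat) (h1 : 1 ≤ k) (h2 : k ≤ l.length) :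
    pvRunEnd l k = k + ((pvSpan (l.getD (k - 1) 0) (l.drop k)).1).length := by
  fun_induction pvRunEnd l k with
  | case1 k h hc ih =>
    have hgk : l.getD k 0 = l[k] := List.getD_eq_getElem l 0 h
    have hd : l.drop k = l[k] :: l.drop (k + 1) := List.drop_eq_getElem_cons h
    have hk1 : k + 1 - 1 = k := by omega
    have hclose : pvClose (l.getD (k - 1) 0) l[k] = true := by
      simp only [pvClose, decide_eq_true_eq]
      rw [← hgk]; exact hc
    rw [ih (by omega) (by omega), hk1, hgk, hd, pvSpan_cons_pos _ _ _ hclose]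
    simp
    omega
  | case2 k h hc =>
    have hgk : l.getD k 0 = l[k] := List.getD_eq_getElem l 0 h
    have hd : l.drop k = l[k] :: l.drop (k + 1) := List.drop_eq_getElem_cons h
    have hnc : pvClose (l.getD (k - 1) 0) l[k] = false := by
      simp only [pvClose, decide_eq_false_iff_not]
      rw [← hgk]; exact hc
    rw [hd, pvSpan_cons_neg _ _ _ hnc]
    simp
  | case3 k h =>
    have : k = l.length := by omega
    subst this
    simp [pvSpan]

theorem pvOuter_acc (idxs : List Int) :
    ∀ (m pos : Nat) (groups : List (List Int)), idxs.length - pos ≤ m →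
      pvOuter idxs pos groups = groups ++ pvOuter idxs pos [] := by
  intro m
  induction m with
  | zero =>
    intro pos groups hm
    have h : ¬ pos < idxs.length := by omega
    rw [pvOuter, if_neg h]
    conv_rhs => rw [pvOuter, if_neg h]
    simp
  | succ m ih =>
    intro pos groups hm
    by_cases h : pos < idxs.length
    · have hk := pvRunEnd_ge idxs (pos + 1)
      rw [pvOuter, if_pos h]
      conv_rhs => rw [pvOuter, if_pos h]
      rw [ih (pvRunEnd idxs (pos + 1))
            (groups ++ [(idxs.drop pos).take (pvRunEnd idxs (pos + 1) - pos)]) (by omega),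
          ih (pvRunEnd idxs (pos + 1))
            ([] ++ [(idxs.drop pos).take (pvRunEnd idxs (pos + 1) - pos)]) (by omega)]
      simp
    · rw [pvOuter, if_neg h]
      conv_rhs => rw [pvOuter, if_neg h]
      simp

theorem pvOuter_span (l : List Int) :
    ∀ (m pos : Nat), l.length - pos ≤ m →
      pvOuter l pos [] = group_indices (l.drop pos) := by
  intro m
  induction m with
  | zero =>
    intro pos hm
    have h : ¬ pos < l.length := by omega
    have hdnil : l.drop pos = [] := List.drop_eq_nil_of_le (by omega)
    rw [pvOuter, if_neg h, hdnil]
    simp [group_indices]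
  | succ m ih =>
    intro pos hm
    by_cases h : pos < l.length
    · have hd : l.drop pos = l[pos] :: l.drop (pos + 1) := List.drop_eq_getElem_cons h
      have hkge := pvRunEnd_ge l (pos + 1)
      have hk := pvRunEnd_span l (pos + 1) (by omega) (by omega)
      rw [Nat.add_sub_cancel, List.getD_eq_getElem l 0 h] at hk
      rw [pvOuter, if_pos h,
          pvOuter_acc l l.length (pvRunEnd l (pos + 1))
            ([] ++ [(l.drop pos).take (pvRunEnd l (pos + 1) - pos)]) (by omega),
          ih (pvRunEnd l (pos + 1)) (by omega)]
      have hsplit := pvSpan_append l[pos] (l.drop (pos + 1))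
      rcases hs : pvSpan l[pos] (l.drop (pos + 1)) with ⟨s1, s2⟩
      rw [hs] at hsplit hk
      dsimp only at hsplit hk
      rw [hk, hd, pvA_cons, hs]
      dsimp only
      have hslice : (l[pos] :: l.drop (pos + 1)).take (pos + 1 + s1.length - pos) = l[pos] :: s1 := by
        have he : pos + 1 + s1.length - pos = s1.length + 1 := by omega
        rw [he, List.take_succ_cons, ← hsplit, List.take_left]
      have hdrop : l.drop (pos + 1 + s1.length) = s2 := by
        rw [← List.drop_drop, ← hsplit, List.drop_left]
      rw [hslice, hdrop]
      simp
    · have hdnil : l.drop pos = [] := List.drop_eq_nil_of_le (by omega)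
      rw [pvOuter, if_neg h, hdnil]
      simp [group_indices]

-- ===== VERDICT (by name: the statement is the Claim_ definition above) =====
theorem group_indices_spec : Claim_equal_group_indices := by
  intro idxs _
  unfold Spec_group_indices
  have := pvOuter_span idxs idxs.length 0 (by omega)
  unfold group_indices_alt
  rw [this]
  simp
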